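-- pv_equiv track=rewrite | github.com/freezeLUO/Motor_Controller_CANOpen | tool/pdo_frequency_monitor.py | _classify_pdo
-- ===== SOURCE A (Python) =====
-- from typing import DefaultDict, Iterable, Optional, Sequence, Tuple
--
-- _TPDO_BASES = (0x180, 0x280, 0x380, 0x480)
--
-- _RPDO_BASES = (0x200, 0x300, 0x400, 0x500)
--
-- _MAX_NODE_ID = 0x7F
--
-- def _classify_pdo(cob_id: int) -> Optional[Tuple[int, str]]:
--     """根据 COB-ID 判断 PDO 方向与节点号。"""
--     for base in _TPDO_BASES:
--         node_id = cob_id - base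
--         if 1 <= node_id <= _MAX_NODE_ID:
--             return node_id, "node->master"
--     for base in _RPDO_BASES:
--         node_id = cob_id - base
--         if 1 <= node_id <= _MAX_NODE_ID:
--             return node_id, "master->node"
--     return None
-- ===== SOURCE B (Python) =====
-- _DIRECTION_BY_FC = {
--     3: "node->master", 5: "node->master", 7: "node->master", 9: "node->master",
--     4: "master->node", 6: "master->node", 8: "master->node", 10: "master->node",
-- }
--
-- def _classify_pdo(cob_id):
--     """根据 COB-ID 判断 PDO 方向与节点号。"""
--     fc, node_id = divmod(cob_id, 0x80)
--     if node_id == 0: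
--         return None
--     direction = _DIRECTION_BY_FC.get(fc)
--     if direction is None:
--         return None
--     return node_id, direction
-- ===== Notes on version B (the rewrite author's own statement) =====
-- stated objective: simpler
-- what changed: Replaced the linear scan over eight 0x80-aligned COB-ID bases with a single divmod-by-0x80 decode (function code + node id) and a function-code -> direction table lookup.
import Mathlib
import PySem

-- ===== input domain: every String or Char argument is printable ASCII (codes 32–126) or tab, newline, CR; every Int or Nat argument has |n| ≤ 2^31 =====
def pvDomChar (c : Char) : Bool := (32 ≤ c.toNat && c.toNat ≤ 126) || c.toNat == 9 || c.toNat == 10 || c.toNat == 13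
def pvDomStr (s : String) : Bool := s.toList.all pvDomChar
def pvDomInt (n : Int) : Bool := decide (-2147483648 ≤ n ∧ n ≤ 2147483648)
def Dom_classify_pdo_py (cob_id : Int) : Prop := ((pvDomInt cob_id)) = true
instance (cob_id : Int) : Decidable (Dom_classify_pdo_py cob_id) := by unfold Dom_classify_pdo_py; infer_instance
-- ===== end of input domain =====

-- B replaces A's linear scan over eight 0x80-aligned bases by one divmod decode plus a
-- function-code table lookup (objective: simpler).
-- ===== PORT A =====
-- the for-loop with early return over a tuple of bases, as structural recursion
def pvScanBases (cob_id : Int) (dir : String) : List Int → Option (Int × String)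
  | [] => none
  | b :: rest =>
    let node_id := cob_id - b
    if 1 ≤ node_id ∧ node_id ≤ 0x7F then some (node_id, dir) else pvScanBases cob_id dir rest

def classify_pdo_py (cob_id : Int) : Option (Int × String) :=
  match pvScanBases cob_id "node->master" [0x180, 0x280, 0x380, 0x480] with
  | some r => some r
  | none => pvScanBases cob_id "master->node" [0x200, 0x300, 0x400, 0x500]

-- ===== PORT B =====
def pvDirectionByFc : PySem.Dict Int String :=
  PySem.Dict.ofList [(3, "node->master"), (5, "node->master"), (7, "node->master"),
                     (9, "node->master"), (4, "master->node"), (6, "master->node"),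
                     (8, "master->node"), (10, "master->node")]

def classify_pdo_py_alt (cob_id : Int) : Option (Int × String) :=
  let fc := PySem.Int.floordiv cob_id 0x80
  let node_id := PySem.Int.mod cob_id 0x80
  if node_id = 0 then none
  else
    match PySem.Dict.get? pvDirectionByFc fc with
    | none => none
    | some direction => some (node_id, direction)

-- ===== PRECONDITION & SPEC =====
def Spec_classify_pdo_py (cob_id : Int) (out : Option (Int × String)) : Prop := out = classify_pdo_py_alt cob_id
instance (cob_id : Int) (out : Option (Int × String)) : Decidable (Spec_classify_pdo_py cob_id out) := by unfold Spec_classify_pdo_py; infer_instance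

-- ===== CLAIM (what is proved, stated in full; the proofs are below) =====
def Claim_equal_classify_pdo_py : Prop := ∀ (cob_id : Int), Dom_classify_pdo_py cob_id → Spec_classify_pdo_py cob_id (classify_pdo_py cob_id)

-- ===== LEMMAS AND PROOFS =====

-- the literal items of the direction table
theorem pv_items : pvDirectionByFc.items =
    [(3, "node->master"), (5, "node->master"), (7, "node->master"), (9, "node->master"),
     (4, "master->node"), (6, "master->node"), (8, "master->node"), (10, "master->node")] := by
  decide

-- a function code outside 3..10 is not in the table
theorem pv_get_none (q : Int) (h : ¬(3 ≤ q ∧ q ≤ 10)) :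
    PySem.Dict.get? pvDirectionByFc q = none := by
  unfold PySem.Dict.get?
  rw [pv_items,
      List.find?_cons_of_neg (by simp; omega), List.find?_cons_of_neg (by simp; omega),
      List.find?_cons_of_neg (by simp; omega), List.find?_cons_of_neg (by simp; omega),
      List.find?_cons_of_neg (by simp; omega), List.find?_cons_of_neg (by simp; omega),
      List.find?_cons_of_neg (by simp; omega), List.find?_cons_of_neg (by simp; omega)]
  rfl

set_option maxHeartbeats 1000000 in
-- A and B agree at any input written as 128*q + r with 0 ≤ r < 128
theorem pv_key (q r : Int) (hr0 : 0 ≤ r) (hr : r < 128) :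
    classify_pdo_py (128 * q + r) = classify_pdo_py_alt (128 * q + r) := by
  have g3 : PySem.Dict.get? pvDirectionByFc 3 = some "node->master" := by decide
  have g4 : PySem.Dict.get? pvDirectionByFc 4 = some "master->node" := by decide
  have g5 : PySem.Dict.get? pvDirectionByFc 5 = some "node->master" := by decide
  have g6 : PySem.Dict.get? pvDirectionByFc 6 = some "master->node" := by decide
  have g7 : PySem.Dict.get? pvDirectionByFc 7 = some "node->master" := by decide
  have g8 : PySem.Dict.get? pvDirectionByFc 8 = some "master->node" := by decide
  have g9 : PySem.Dict.get? pvDirectionByFc 9 = some "node->master" := by decide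
  have g10 : PySem.Dict.get? pvDirectionByFc 10 = some "master->node" := by decide
  unfold classify_pdo_py classify_pdo_py_alt
  rw [PySem.Int.floordiv_eq_ediv_of_pos (by norm_num), PySem.Int.mod_eq_emod_of_pos (by norm_num)]
  have hq : (128 * q + r) / 128 = q := by omega
  have hm : (128 * q + r) % 128 = r := by omega
  rw [hq, hm]
  by_cases h0 : r = 0
  · subst h0
    rw [if_pos rfl]
    simp only [pvScanBases]
    split_ifs <;> first | rfl | omega
  · rw [if_neg h0]
    by_cases hb : 3 ≤ q ∧ q ≤ 10
    · obtain ⟨hb1, hb2⟩ := hb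
      interval_cases q <;>
        simp only [pvScanBases, g3, g4, g5, g6, g7, g8, g9, g10] <;>
        split_ifs <;> first | omega | (simp; all_goals omega)
    · rw [pv_get_none q hb]
      simp only [pvScanBases]
      split_ifs <;> first | rfl | omega

-- ===== VERDICT (by name: the statement is the Claim_ definition above) =====
theorem classify_pdo_py_spec : Claim_equal_classify_pdo_py := by
  intro cob_id _
  unfold Spec_classify_pdo_py
  have h : cob_id = 128 * (cob_id / 128) + cob_id % 128 := by omega
  rw [h]
  refine pv_key (cob_id / 128) (cob_id % 128) ?_ ?_ <;> omega
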